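-- pv_equiv track=rewrite | github.com/miruuna/AMPSynergy_RSC_2024 | scripts/utils_processing/cluster_processing.py | get_pep_from_res
-- ===== SOURCE A (Python) =====
-- def get_pep_from_res(res, pep_type):
--     if "WF1a_only" in pep_type:
--         pep_dict = \
--             {1: (1, 20),
--             2: (21, 40),
--             3: (41, 60),
--             4: (61, 80),
--             5: (81, 100),
--             6: (101, 120),
--             7: (121, 140),
--             8: (141, 160)}
--     elif "WF2_only" in pep_type:
--         pep_dict = {
--             1: (1, 25),
--             2: (26, 50),
--             3: (51, 75),
--             4: (76, 100),
--             5: (101, 125),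
--             6: (126, 150),
--             7: (151, 175),
--             8: (176, 200)}
--     else:
--         pep_dict = {1: (1, 20),
--                 2: (21, 40),
--                 3: (41, 60),
--                 4: (61, 80),
--                 5: (81, 105),
--                 6: (106, 130),
--                 7: (131, 155),
--                 8: (156, 180)}
--
--     val = None
--     for k, v in pep_dict.items():
--         if int(res) in range(v[0], v[1]+1):
--             val = k
--     return val
-- ===== SOURCE B (Python) =====
-- def get_pep_from_res(res, pep_type):
--     x = int(res)
--     if "WF1a_only" in pep_type:
--         return (x - 1) // 20 + 1 if 1 <= x <= 160 else None
--     if "WF2_only" in pep_type: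
--         return (x - 1) // 25 + 1 if 1 <= x <= 200 else None
--     if 1 <= x <= 80:
--         return (x - 1) // 20 + 1
--     if 81 <= x <= 180:
--         return 5 + (x - 81) // 25
--     return None
-- ===== Notes on version B (the rewrite author's own statement) =====
-- stated objective: simpler
-- what changed: Replaces the three literal bucket dictionaries and the scan over all eight ranges with a closed-form floor-division formula per pep_type branch.
import Mathlib
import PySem

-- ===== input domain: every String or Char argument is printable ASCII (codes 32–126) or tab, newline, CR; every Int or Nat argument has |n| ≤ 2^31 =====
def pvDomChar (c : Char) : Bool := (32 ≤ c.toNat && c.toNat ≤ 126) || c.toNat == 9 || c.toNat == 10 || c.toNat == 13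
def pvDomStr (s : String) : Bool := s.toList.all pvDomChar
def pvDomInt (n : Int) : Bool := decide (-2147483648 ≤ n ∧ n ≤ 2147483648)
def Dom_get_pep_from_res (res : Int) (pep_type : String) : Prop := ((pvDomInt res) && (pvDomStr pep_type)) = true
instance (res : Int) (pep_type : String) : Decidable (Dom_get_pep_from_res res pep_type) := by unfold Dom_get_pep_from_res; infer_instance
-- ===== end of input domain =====

-- B replaces the dict-build-and-scan with a closed-form floor-division formula per branch (objective: simpler).

-- ===== PORT A =====
-- the three literal dicts of A, as insertion-ordered association lists
def pepTableWF1a : List (Int × (Int × Int)) :=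
  [(1, (1, 20)), (2, (21, 40)), (3, (41, 60)), (4, (61, 80)),
   (5, (81, 100)), (6, (101, 120)), (7, (121, 140)), (8, (141, 160))]

def pepTableWF2 : List (Int × (Int × Int)) :=
  [(1, (1, 25)), (2, (26, 50)), (3, (51, 75)), (4, (76, 100)),
   (5, (101, 125)), (6, (126, 150)), (7, (151, 175)), (8, (176, 200))]

def pepTableDefault : List (Int × (Int × Int)) :=
  [(1, (1, 20)), (2, (21, 40)), (3, (41, 60)), (4, (61, 80)),
   (5, (81, 105)), (6, (106, 130)), (7, (131, 155)), (8, (156, 180))]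

-- the loop: 'int(res) in range(v[0], v[1]+1)' is exactly v[0] ≤ res < v[1]+1 (step-1 range membership)
def get_pep_from_res (res : Int) (pep_type : String) : Option Int :=
  let pep_dict :=
    if PySem.Str.isIn "WF1a_only" pep_type then pepTableWF1a
    else if PySem.Str.isIn "WF2_only" pep_type then pepTableWF2
    else pepTableDefault
  pep_dict.foldl (fun val kv => if kv.2.1 ≤ res ∧ res < kv.2.2 + 1 then some kv.1 else val) none

-- ===== PORT B =====
def get_pep_from_res_alt (res : Int) (pep_type : String) : Option Int :=
  let x := res
  if PySem.Str.isIn "WF1a_only" pep_type then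
    if 1 ≤ x ∧ x ≤ 160 then some (PySem.Int.floordiv (x - 1) 20 + 1) else none
  else if PySem.Str.isIn "WF2_only" pep_type then
    if 1 ≤ x ∧ x ≤ 200 then some (PySem.Int.floordiv (x - 1) 25 + 1) else none
  else if 1 ≤ x ∧ x ≤ 80 then some (PySem.Int.floordiv (x - 1) 20 + 1)
  else if 81 ≤ x ∧ x ≤ 180 then some (5 + PySem.Int.floordiv (x - 81) 25)
  else none

-- ===== PRECONDITION & SPEC =====
def Spec_get_pep_from_res (res : Int) (pep_type : String) (out : Option Int) : Prop := out = get_pep_from_res_alt res pep_type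
instance (res : Int) (pep_type : String) (out : Option Int) : Decidable (Spec_get_pep_from_res res pep_type out) := by unfold Spec_get_pep_from_res; infer_instance

-- ===== CLAIM (what is proved, stated in full; the proofs are below) =====
def Claim_equal_get_pep_from_res : Prop := ∀ (res : Int) (pep_type : String), Dom_get_pep_from_res res pep_type → Spec_get_pep_from_res res pep_type (get_pep_from_res res pep_type)

-- ===== LEMMAS AND PROOFS =====
theorem fd20 (x : Int) : PySem.Int.floordiv x 20 = x / 20 :=
  PySem.Int.floordiv_eq_ediv_of_pos (by omega)

theorem fd25 (x : Int) : PySem.Int.floordiv x 25 = x / 25 :=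
  PySem.Int.floordiv_eq_ediv_of_pos (by omega)

theorem tableWF1a_eq (res : Int) :
    pepTableWF1a.foldl (fun val kv => if kv.2.1 ≤ res ∧ res < kv.2.2 + 1 then some kv.1 else val) none
    = if 1 ≤ res ∧ res ≤ 160 then some (PySem.Int.floordiv (res - 1) 20 + 1) else none := by
  simp only [pepTableWF1a, List.foldl, fd20]
  split_ifs <;> (first | rfl | (exfalso; omega) | (congr 1; omega))

theorem tableWF2_eq (res : Int) :
    pepTableWF2.foldl (fun val kv => if kv.2.1 ≤ res ∧ res < kv.2.2 + 1 then some kv.1 else val) none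
    = if 1 ≤ res ∧ res ≤ 200 then some (PySem.Int.floordiv (res - 1) 25 + 1) else none := by
  simp only [pepTableWF2, List.foldl, fd25]
  split_ifs <;> (first | rfl | (exfalso; omega) | (congr 1; omega))

theorem tableDefault_eq (res : Int) :
    pepTableDefault.foldl (fun val kv => if kv.2.1 ≤ res ∧ res < kv.2.2 + 1 then some kv.1 else val) none
    = if 1 ≤ res ∧ res ≤ 80 then some (PySem.Int.floordiv (res - 1) 20 + 1)
      else if 81 ≤ res ∧ res ≤ 180 then some (5 + PySem.Int.floordiv (res - 81) 25)
      else none := by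
  simp only [pepTableDefault, List.foldl, fd20, fd25]
  split_ifs <;> (first | rfl | (exfalso; omega) | (congr 1; omega))

-- ===== VERDICT (by name: the statement is the Claim_ definition above) =====
theorem get_pep_from_res_spec : Claim_equal_get_pep_from_res := by
  intro res pep_type _
  unfold Spec_get_pep_from_res get_pep_from_res get_pep_from_res_alt
  dsimp only
  by_cases h1 : PySem.Str.isIn "WF1a_only" pep_type = true
  · rw [if_pos h1, if_pos h1]; exact tableWF1a_eq res
  · rw [if_neg h1, if_neg h1]
    by_cases h2 : PySem.Str.isIn "WF2_only" pep_type = true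
    · rw [if_pos h2, if_pos h2]; exact tableWF2_eq res
    · rw [if_neg h2, if_neg h2]; exact tableDefault_eq res
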